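/-
  SEGMENT .9 OF `start_decoder` (0x114184–0x114286 + the stubs 0x1141bf, 0x114415, 0x114427: the third packet start, crc32_init, packet
  type 5, loop 3737 `header[i] = get8_packet(f)`, vorbis_validate, `codebook_count = get_bits(f, 8) + 1`, the codebooks block, its
  memset; stb_vorbis_fixed.c 3729–3746; 60 instructions, 11 contract call sites, 4 check sites) SPLIT AT THE EXISTING LABELS
  `cut71` (0x114199, the return of crc32_init), `cut76` (0x1141f7 = `loop6`, the head of loop 3737), `cut77` (0x11420a, the return of
  vorbis_validate), `cut78` (0x11421f, the return of get_bits), AND, AT `cut78`, BY THE CASE "the request `2120 · count` fits the arena":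
  the cut assertion `In9`, the claims of the six children, and the composition `Seg9.of_parts` (pure logic; no machine step).
  The cuts are the farm worker's (unit start_decoder.9, attempt 1, PROBLEM / SPLIT: its `Body9At`; `seg9a` … `seg9d`, `seg9e_fail`
  compiled there) and agree with H-21's block.

      .9a  0x114184–0x114194               `start_packet(f)`; 0 → the epilogue DIRECTLY (`je 113b22`, eax = 0); `crc32_init()`
                                           exits: AtERR, In9 @cut71
      .9b  0x114199–0x1141ab + 0x1141bf–0x1141cc   `get8_packet(f) != 5` → the stub (`error(f, 20)`); `i = 0` (r13d = Z24)
                                           exits: AtERR, In9 @cut76 ∧ r13 = 0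
      .9c  0x1141f7–0x114205 + 0x1141d1–0x1141f3   ONE ROUND of loop 3737 (`cmp r13d, 5 ; jle` → get8_packet, the checked byte store
                                           `header[i]`, `inc r13d`, back to the head) or its exit (`lea rdi, [rsp + a0H] ; call vorbis_validate`)
                                           exits: In9 @cut76 ∧ r13 = j ≤ 6 ∧ 6 − j < 6 − i, In9 @cut77
      .9d  0x11420a–0x11421a + 0x114415–0x114422   `!vorbis_validate(header)` → the stub (`error(f, 20)`); `get_bits(f, 8)`
                                           exits: AtERR, In9 @cut78 ∧ rax < 256
      .9e  0x11421f–0x114240 + 0x114245–0x11424a(je) + 0x114427–0x114434   THE REQUEST DOES NOT FIT: the checked store of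
                                           `codebook_count`, setup_malloc returns NULL, the stub (`error(f, 3)`)      exit: AtERR
      .9f  0x11421f–0x114286               THE REQUEST FITS: the same, the checked store of `codebooks`, the re-load of the count,
                                           `memset(codebooks, 0, 2120 · count)` returns into 0x11428b                  exit: AtC1

  WHAT IS LIVE AT THE CUTS (c/vorbis_f.dis 114184 … 114286): rbp (= f: every access is `[rbp + …]` / `mov rdi, rbp`), rsp; at `cut76`
  r13d (the counter i: `cmp r13d, 5`, `movsxd rax, r13d`, `inc r13d`); at `cut78` eax (`lea r13d, [rax + 1]`: get_bits(f, 8) < 256, so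
  1 ≤ count ≤ 256 and `imul esi, r13d, 848H` ≤ 84800H does not wrap). eax at `cut71` (crc32_init: void), at `cut76`, and at `cut77`
  (`test eax, eax ; je`: both values are handled by .9d) is NOT asserted. rbx r12 r14 r15 are dead at every cut. The content of
  `header[]` is not asserted (nothing downstream reads it). `Body9.bytes0` is consumed by start_packet's precondition in .9a only.
  NOTHING of `*f` but the readers' windows, `error`, and off `*f` the `crc_table` and `header[]` is written before 0x11422f: the full
  `Real.SD … 2` holds at all four cuts. AFTER 0x11422f (`codebook_count = count ≠ 0` with `codebooks = NULL`) neither `SDw 2` nor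
  `SDw 3` holds: that is why `cut79` (the return of setup_malloc) is NOT a cut (its assertion would be new; `P1.late_parts` is what
  survives) and the two arms of the allocation are two children instead.
-/
import Vorbis.Spec.StartDecoder1
import Vorbis.LabelsAt

open X86 X86.User Asan Vorbis Vorbis.Spec

set_option maxRecDepth 4000
set_option maxHeartbeats 4000000

namespace Vorbis.Spec.StartDecoder

/-- **THE CUT ASSERTION OF SEGMENT `.9`** (at `cut71` = 0x114199, `cut76` = 0x1141f7, `cut77` = 0x11420a, `cut78` = 0x11421f):
`Body9` at another program counter, without `bytes_in_seg = 0` — the full `SD 2` survives everything the segment does before the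
store of `codebook_count` (0x11422f): the readers', `error`'s and `crc32_init`'s footprints, the stores `header[i]`. -/
structure In9 (u₀ : State) (g : Ghost) (pc : Word) (A : Arena × List Obj) (v : State) : Prop where
  /-- the common part at `pc` (rip, rsp = R, the code, the shadow layer, the own footprint so far) -/
  frame : Frame u₀ g pc A v
  /-- the hand-over carrier (what the caller's frame and the arena are) -/
  hand : g.Hand A
  /-- rbp = f: never written in part 1, callee-saved over every call -/
  rbp : v.reg .rbp = addr g.f
  /-- the program point SD 2 (comment header read; Z24 exported by segment .8) -/
  sd : Real.SD g.len 2 A (g.Blk A) (g.Live A) v.mem g.f g.R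
  /-- CM1 – CM3 over the arena's OWN blocks (`Body9.own`) -/
  own : Own 2 A.1.Blk v.mem g.f

namespace S9
open P1

/-- The entry assertion of the segment is the cut assertion at `pc_9`. -/
theorem of_body9 {u₀ : State} {g : Ghost} {A : Arena × List Obj} {v : State} (h : Body9 u₀ g A v) :
    In9 u₀ g pc_9 A v :=
  ⟨h.frame, h.hand, h.rbp, h.sd, h.own⟩

/-- **An error exit of segment `.9` before the allocation** (`je 113b22` after start_packet; the stubs 0x1141bf, 0x114415 after
`error`): the epilogue's assertion `AtERR` with eax = 0 and SD.ERR, from the cut assertion `In9` the path started at, the footprint since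
(inside `Wmax`), `Bits` in the present memory and the machine facts of the present state. -/
theorem err_exit {u₀ : State} {g : Ghost} {pc : Word} {A : Arena × List Obj} {v s : State} (hb : In9 u₀ g pc A v)
    (hs : Mem.SameExcept (Wmax g.RA g.f) v.mem s.mem) (hun : ShadowUntouched v.mem s.mem)
    (hbits : Bits (g.Blk A) g.len s.mem g.f) (hrip : s.rip = pc_ERR) (hrsp : s.reg .rsp = addr g.R)
    (hcode : CodeOK u₀ s.mem) (hinv : abiInv s) (hrax : (s.reg .rax).toNat % 2 ^ 32 = 0) : AtERR u₀ g s := by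
  have hlay := layout_facts hb.frame hb.hand hb.sd
  have hw := wmax_ok hb.frame hb.hand hb.sd
  have hsd := (sd2_carry hb.sd (hb.own.comment (by omega)) hs hun hbits (by omega) (by omega) (fun w hw' => (hw w hw').1)).1
  exact ⟨A, frame_carry hb.frame hs hun hrip hrsp hcode hinv (fun w hw' => (hw w hw').2), hb.hand,
    Or.inl ⟨hrax, Failed.of_sd hsd⟩⟩

/-- **The cut assertion at a later point of the segment**, from the entry assertion, the footprint so far (inside `Wmax`),
`Bits` in the present memory and the machine facts of the present state. -/
theorem mid_exit {u₀ : State} {g : Ghost} {pc pc' : Word} {A : Arena × List Obj} {v s : State} (hb : In9 u₀ g pc A v)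
    (hs : Mem.SameExcept (Wmax g.RA g.f) v.mem s.mem) (hun : ShadowUntouched v.mem s.mem)
    (hbits : Bits (g.Blk A) g.len s.mem g.f) (hrip : s.rip = pc') (hrsp : s.reg .rsp = addr g.R)
    (hcode : CodeOK u₀ s.mem) (hinv : abiInv s) (hrbp : s.reg .rbp = addr g.f) : In9 u₀ g pc' A s := by
  have hlay := layout_facts hb.frame hb.hand hb.sd
  have hw := wmax_ok hb.frame hb.hand hb.sd
  obtain ⟨hsd, hcm⟩ :=
    sd2_carry hb.sd (hb.own.comment (by omega)) hs hun hbits (by omega) (by omega) (fun w hw' => (hw w hw').1)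
  refine ⟨frame_carry hb.frame hs hun hrip hrsp hcode hinv (fun w hw' => (hw w hw').2), hb.hand, hrbp, hsd, ?_⟩
  exact
    { comment := fun _ => hcm
      cb0 := fun h3 => absurd h3 (by omega)
      nonnull := fun h3 => absurd h3 (by omega)
      books := fun h5 => absurd h5 (by omega)
      floor := fun h6 => absurd h6 (by omega)
      residue := fun h7 => absurd h7 (by omega)
      mapping := fun h8 => absurd h8 (by omega) }

/-- **Exit 4 of segment `.9`** (the stub 0x114427 after `error(f, 3)`): the epilogue's assertion from the cut assertion at
`cut78`, the footprint since (allowed windows, the shadow window of the failed allocation dropped), the allocator's `ArenaOK`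
carried to the present memory, `codebooks = NULL`. -/
theorem err4_exit {u₀ : State} {g : Ghost} {pc : Word} {A : Arena × List Obj} {v s : State} {ws : List Span}
    (hb : In9 u₀ g pc A v) (hs : Mem.SameExcept ws v.mem s.mem) (hwL : ∀ w, w ∈ ws → LateWin A.1 g.f g.R w)
    (hwF : ∀ w, w ∈ ws → FrameWin2 g w) (hun : ShadowUntouched v.mem s.mem) (harena : ArenaOK A.1 A.2 s.mem g.f)
    (hnull : stb_vorbis.codebooks s.mem g.f = 0) (hrip : s.rip = pc_ERR) (hrsp : s.reg .rsp = addr g.R)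
    (hcode : CodeOK u₀ s.mem) (hinv : abiInv s) (hrax : (s.reg .rax).toNat % 2 ^ 32 = 0) : AtERR u₀ g s := by
  have hlay := layout_facts hb.frame hb.hand hb.sd
  obtain ⟨_, hbits, _, _, _, hcm, _, hr⟩ :=
    late_parts hb.sd (hb.own.comment (by omega)) hs (by omega) (by omega) hwL
  exact ⟨A, frame_carry2 hb.frame hs (hb.frame.shadow.untouched hun) hb.frame.offText hb.frame.ext hrip hrsp hcode hinv hwF,
    hb.hand, Or.inl ⟨hrax, failed_null (hb.sd.env.eqOn hun) hbits harena hcm hr hnull⟩⟩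

/-- **The exit `AtC1` of segment `.9`** (0x11428b, after `memset(f->codebooks, 0, 2120 · count)` returned): the hand-over assertion
from the cut assertion at `cut78`, the footprint since (allowed windows), the allocator's postcondition carried to the present
memory (`hsh`, `harena`), the two stored fields and the zero fill. `n` = the result of `get_bits(f, 8)`. -/
theorem c1_exit {u₀ : State} {g : Ghost} {pc : Word} {A : Arena × List Obj} {v s : State} {ws : List Span} (n : Nat)
    (hb : In9 u₀ g pc A v) (hn : n < 256) (_hfit : A.1.Fits (2120 * (n + 1)))
    (hs : Mem.SameExcept ws v.mem s.mem) (hwL : ∀ w, w ∈ ws → LateWin A.1 g.f g.R w)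
    (hwF : ∀ w, w ∈ ws → FrameWin2 g w)
    (hsh : ShadowInv (A.1.newSetupObj (2120 * (n + 1)) :: A.2) g.frames' g.R s.mem)
    (harena : ArenaOK (A.1.pushSetup (2120 * (n + 1))) (A.1.newSetupObj (2120 * (n + 1)) :: A.2) s.mem g.f)
    (hcnt : s.mem.u32 (g.f + 160) = n + 1) (hcb : s.mem.u64 (g.f + 168) = A.1.B + A.1.S + 32)
    (hzero : ZeroFill s.mem (A.1.B + A.1.S + 32) (2120 * (n + 1)))
    (hrip : s.rip = pc_C1) (hrsp : s.reg .rsp = addr g.R) (hcode : CodeOK u₀ s.mem) (hinv : abiInv s)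
    (hrbp : s.reg .rbp = addr g.f) : AtC1 u₀ g s := by
  have hlay := layout_facts hb.frame hb.hand hb.sd
  obtain ⟨hc, hbits, hfirst, hd, hhd, _, hcm, hr⟩ :=
    late_parts hb.sd (hb.own.comment (by omega)) hs (by omega) (by omega) hwL
  have harena0 : ArenaOK A.1 A.2 v.mem g.f := hb.sd.arena
  -- the new ghost
  refine ⟨(A.1.pushSetup (2120 * (n + 1)), A.1.newSetupObj (2120 * (n + 1)) :: A.2), ?_⟩
  have hextA : A.1.Extends (A.1.pushSetup (2120 * (n + 1))) := A.1.extends_pushSetup _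
  have hhand : g.Hand (A.1.pushSetup (2120 * (n + 1)), A.1.newSetupObj (2120 * (n + 1)) :: A.2) :=
    HandOK.mono hb.hand hextA (fun o ho => List.mem_cons_of_mem _ ho)
  -- the fields
  have ecnt : stb_vorbis.codebook_count s.mem g.f = (n : Int) + 1 := by
    simp only [vacc, voff]
    unfold Mem.i32
    rw [hcnt]
    unfold sint32
    split <;> omega
  have ecb : stb_vorbis.codebooks s.mem g.f = A.1.B + A.1.S + 32 := by
    simp only [vacc, voff]
    exact hcb
  have hne : stb_vorbis.codebooks s.mem g.f ≠ 0 := by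
    rw [ecb]
    omega
  have hF2 : Since A.1 (A.1.pushSetup (2120 * (n + 1)))
      ⟨stb_vorbis.codebooks s.mem g.f, Off.sizeof.Codebook * (stb_vorbis.codebook_count s.mem g.f).toNat⟩ := by
    have h0 := harena0.since_pushSetup (2120 * (n + 1))
    have e1 : Off.sizeof.Codebook * (stb_vorbis.codebook_count s.mem g.f).toNat = 2120 * (n + 1) := by
      rw [ecnt]
      simp only [voff]
      omega
    rw [e1, ecb, Nat.add_assoc]
    exact h0
  have hages : BookTrans A.1 (A.1.pushSetup (2120 * (n + 1))) (A.1.pushSetup (2120 * (n + 1)))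
      (A.1.pushSetup (2120 * (n + 1))) s.mem g.f 0 :=
    BookTrans.zero hextA hcm (by rw [ecnt]; omega) hF2 hne
  have hown := hages.upTo.own
  -- the environment of a check site over the new ghost
  have hsubO : ∀ o, o ∈ stackObjs g.frames' ++ A.2 →
      o ∈ stackObjs g.frames' ++ (A.1.newSetupObj (2120 * (n + 1)) :: A.2) := by
    intro o ho
    rcases List.mem_append.mp ho with h1 | h2
    · exact List.mem_append_left _ h1
    · exact List.mem_append_right _ (List.mem_cons_of_mem _ h2)
  have hxok : BlkOK (listBlk (objBlock g.f :: fixedBlocks g.len)) :=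
    ⟨fun B hB => hb.sd.env.ok.inside B (Or.inr hB), fun B C hB hC => hb.sd.env.ok.apart B C (Or.inr hB) (Or.inr hC)⟩
  have hxlive : BlkLive (listBlk (objBlock g.f :: fixedBlocks g.len))
      (Asan.Live (stackObjs g.frames' ++ (A.1.newSetupObj (2120 * (n + 1)) :: A.2))) := by
    refine BlkLive.mono (BlkLive.sub hb.sd.env.live (fun B hB => Or.inr hB)) ?_
    intro x hx
    obtain ⟨o, ho, hbx⟩ := hx
    exact ⟨o, hsubO o ho, hbx⟩
  have henv : Env (g.Blk (A.1.pushSetup (2120 * (n + 1)), A.1.newSetupObj (2120 * (n + 1)) :: A.2))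
      (g.Live (A.1.pushSetup (2120 * (n + 1)), A.1.newSetupObj (2120 * (n + 1)) :: A.2)) s.mem := by
    refine ⟨hsh.covers, ?_, ?_⟩
    · apply harena.runBlk_ok hxok
      intro C hC
      rcases List.mem_cons.mp hC with rfl | hm
      · exact hhand.objOut
      · exact hhand.outside C hm
    · exact harena.runBlk_live (fun o ho => List.mem_append_right _ ho) hxlive
  -- the zero fill
  have hz : ZF s.mem (stb_vorbis.codebooks s.mem g.f) (stb_vorbis.codebook_count s.mem g.f).toNat 0 := by
    apply ZF.init
    have e1 : Off.sizeof.Codebook * (stb_vorbis.codebook_count s.mem g.f).toNat = 2120 * (n + 1) := by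
      rw [ecnt]
      simp only [voff]
      omega
    rw [e1, ecb]
    exact hzero
  -- the common part
  have hoffT : ∀ o, o ∈ A.1.newSetupObj (2120 * (n + 1)) :: A.2 → L.textHi ≤ o.base := by
    intro o ho
    rcases List.mem_cons.mp ho with rfl | hm
    · have eb : (A.1.newSetupObj (2120 * (n + 1))).base = A.1.B + (A.1.S + 32) := rfl
      have := hb.hand.arenaText
      omega
    · exact hb.frame.offText o hm
  have hfr : Frame u₀ g pc_C1 (A.1.pushSetup (2120 * (n + 1)), A.1.newSetupObj (2120 * (n + 1)) :: A.2) s :=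
    frame_carry2 hb.frame hs hsh hoffT (hb.frame.ext.trans hextA) hrip hrsp hcode hinv hwF
  have hbits' : Bits (g.Blk (A.1.pushSetup (2120 * (n + 1)), A.1.newSetupObj (2120 * (n + 1)) :: A.2)) g.len s.mem g.f := by
    refine hbits.reblk ?_ ?_
    · exact runBlk_extra List.mem_cons_self
    · apply runBlk_extra
      simp only [fixedBlocks, List.mem_cons, true_or, or_true]
  exact
    { frame := hfr
      hand := hhand
      rbp := hrbp
      sd := sd4_of_parts henv hc harena (up g _) hb.sd.noTemps hbits' hfirst hd hhd
        (CommentsOK.reblk (hown.comment (by omega)) (fun B _ hB => up g _ B hB))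
        (CB0.reblk (hown.cb0 (by omega)) (fun B _ hB => up g _ B hB)) hne (by rw [ecnt]; omega) hz hr
      ages := ⟨A.1, hages⟩ }

/-- **The literal window list of the arm "the request fits" of segment `.9`** (from `cut78` to the return of memset): the stack below
the steady stack pointer, `setup_memory_required`, `setup_offset`, `codebook_count` … `codebooks`, the allocator's shadow span of the
new block `P = B + S + 32`, the block itself (the memset). -/
def FitWins (RA f P N : Nat) : List Span :=
  [⟨RA - 1888, RA - 1480⟩, ⟨f + 8, f + 12⟩, ⟨f + 128, f + 132⟩, ⟨f + 160, f + 176⟩, shadowSpan P (P + N), ⟨P, P + N⟩]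

/-- Every window of `FitWins` is allowed for what survives of `SD 2` (`LateWin`) and for `Frame` (`FrameWin2`), when the request
`N` fits the ghost arena. Stated apart from the walk: `omega` sees only the facts it needs. -/
theorem fitWins_ok {u₀ : State} {g : Ghost} {pc : Word} {A : Arena × List Obj} {v : State} (hb : In9 u₀ g pc A v) {N : Nat}
    (hfit : A.1.Fits N) :
    ∀ w, w ∈ FitWins g.RA g.f (A.1.B + A.1.S + 32) N → LateWin A.1 g.f g.R w ∧ FrameWin2 g w := by
  obtain ⟨hRA, hR8, hroom, htop, hfstack, hflo, hfhi, hflog, hfcrc, hfout, hAstack, hAcrc, hAhi, hAlo⟩ :=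
    layout_facts hb.frame hb.hand hb.sd
  have hbnd := (show ArenaOK A.1 A.2 v.mem g.f from hb.sd.arena).bounds
  have hfitN : A.1.S + 32 + r8 N ≤ A.1.T := hfit
  have hle8 := le_r8 N
  have eB := hb.frame.ext.B
  have eL := hb.frame.ext.L
  have hlog := hb.hand.outside ⟨0x120640, 16⟩ (by simp only [fixedBlocks, globalBlocks, List.mem_cons, true_or, or_true])
  simp only [] at hlog
  intro w hw
  simp only [FitWins, List.mem_cons, List.mem_nil_iff, or_false] at hw
  unfold LateWin FrameWin2 FrameWin
  simp only [depth]
  rcases hw with rfl | rfl | rfl | rfl | rfl | rfl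
  all_goals simp only [shadowSpan]
  all_goals constructor
  all_goals omega

end S9

/-- **Segment .9a, 0x114184–0x114194** (line 3729 – 3730): `start_packet(f)` — 0 → the epilogue directly with eax = 0 (`AtERR`) —
and `crc32_init()`, which returns into 0x114199 (`cut71`). -/
def Seg9a (Lay : Layout) (μ : Microarch) (u₀ : State) : Prop :=
  ∀ (g : Ghost) (v : State), At9 u₀ g v →
    ReachVia Lay μ WayInv v (fun w => (∃ A, In9 u₀ g Vorbis.L.start_decoder.cut71 A w) ∨ AtERR u₀ g w)

/-- **Segment .9b, 0x114199–0x1141ab + 0x1141bf–0x1141cc** (line 3732): `get8_packet(f) != VORBIS_packet_setup` → the stub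
`error(f, VORBIS_invalid_setup)` → the epilogue; else `i = 0` (r13d = Z24 = 0) and the head of loop 3737 (`cut76`). -/
def Seg9b (Lay : Layout) (μ : Microarch) (u₀ : State) : Prop :=
  ∀ (g : Ghost) (A : Arena × List Obj) (v : State), In9 u₀ g Vorbis.L.start_decoder.cut71 A v →
    ReachVia Lay μ WayInv v (fun w =>
      (∃ A, In9 u₀ g Vorbis.L.start_decoder.cut76 A w ∧ w.reg .r13 = 0) ∨ AtERR u₀ g w)

/-- **Segment .9c, 0x1141f7–0x114205 + 0x1141d1–0x1141f3** (line 3733 – 3734): ONE ROUND of loop 3737 (`header[i] = get8_packet(f)`,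
back at the head with the counter `j` nearer to 6) or its exit (`i = 6`: `vorbis_validate(header)` returns into 0x11420a, `cut77`). -/
def Seg9c (Lay : Layout) (μ : Microarch) (u₀ : State) : Prop :=
  ∀ (g : Ghost) (A : Arena × List Obj) (v : State) (i : Nat), In9 u₀ g Vorbis.L.start_decoder.cut76 A v →
    i ≤ 6 → v.reg .r13 = UInt64.ofNat i →
    ReachVia Lay μ WayInv v (fun w =>
      (∃ A j, In9 u₀ g Vorbis.L.start_decoder.cut76 A w ∧ j ≤ 6 ∧ w.reg .r13 = UInt64.ofNat j ∧ 6 - j < 6 - i) ∨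
      (∃ A, In9 u₀ g Vorbis.L.start_decoder.cut77 A w))

/-- **Segment .9d, 0x11420a–0x11421a + 0x114415–0x114422** (line 3734, 3738): `!vorbis_validate(header)` → the stub
`error(f, VORBIS_invalid_setup)` → the epilogue; else `get_bits(f, 8)` returns into 0x11421f (`cut78`) with a value below 256. -/
def Seg9d (Lay : Layout) (μ : Microarch) (u₀ : State) : Prop :=
  ∀ (g : Ghost) (A : Arena × List Obj) (v : State), In9 u₀ g Vorbis.L.start_decoder.cut77 A v →
    ReachVia Lay μ WayInv v (fun w =>
      (∃ A, In9 u₀ g Vorbis.L.start_decoder.cut78 A w ∧ (w.reg .rax).toNat < 256) ∨ AtERR u₀ g w)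

/-- **Segment .9e, 0x11421f–0x11424a + 0x114427–0x114434, THE REQUEST IS REFUSED** (line 3738 – 3740): the checked store of
`codebook_count`, `setup_malloc(f, 2120 · count)` returns NULL (the ghost arena does not fit the request), the stub
`error(f, VORBIS_outofmem)` → the epilogue. (The conclusion lists both exits of the parent; only `AtERR` is reached.) -/
def Seg9e (Lay : Layout) (μ : Microarch) (u₀ : State) : Prop :=
  ∀ (g : Ghost) (A : Arena × List Obj) (v : State), In9 u₀ g Vorbis.L.start_decoder.cut78 A v →
    (v.reg .rax).toNat < 256 → ¬ A.1.Fits (2120 * ((v.reg .rax).toNat + 1)) →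
    ReachVia Lay μ WayInv v (fun w => AtC1 u₀ g w ∨ AtERR u₀ g w)

/-- **Segment .9f, 0x11421f–0x114286, THE REQUEST FITS** (line 3738 – 3741): the checked store of `codebook_count`,
`setup_malloc(f, 2120 · count)` returns the new block, the checked store of `codebooks`, the re-load of the count,
`memset(codebooks, 0, 2120 · count)` returns into 0x11428b: the hand-over assertion `AtC1` (`S9.c1_exit`). -/
def Seg9f (Lay : Layout) (μ : Microarch) (u₀ : State) : Prop :=
  ∀ (g : Ghost) (A : Arena × List Obj) (v : State), In9 u₀ g Vorbis.L.start_decoder.cut78 A v →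
    (v.reg .rax).toNat < 256 → A.1.Fits (2120 * ((v.reg .rax).toNat + 1)) →
    ReachVia Lay μ WayInv v (fun w => AtC1 u₀ g w ∨ AtERR u₀ g w)

/-- **Loop 3737 as a whole**, from one round (`Seg9c`): from the loop head `cut76` with `r13 = i ≤ 6` to `cut77`, by induction on a
bound `k` of the measure `6 − i`. -/
theorem S9.loop_all {Lay : Layout} {μ : Microarch} {u₀ : State} (hc : Seg9c Lay μ u₀) (g : Ghost) :
    ∀ (k : Nat) (A : Arena × List Obj) (v : State) (i : Nat), 6 - i ≤ k →
      In9 u₀ g Vorbis.L.start_decoder.cut76 A v → i ≤ 6 → v.reg .r13 = UInt64.ofNat i →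
      ReachVia Lay μ WayInv v (fun w => ∃ A, In9 u₀ g Vorbis.L.start_decoder.cut77 A w) := by
  intro k
  induction k with
  | zero =>
    intro A v i hk hb hi hr
    refine (hc g A v i hb hi hr).trans ?_
    intro w hw
    rcases hw with ⟨A', j, _, _, _, hlt⟩ | hex
    · omega
    · exact ReachVia.done hex
  | succ k ih =>
    intro A v i hk hb hi hr
    refine (hc g A v i hb hi hr).trans ?_
    intro w hw
    rcases hw with ⟨A', j, hb', hj, hr', hlt⟩ | hex
    · exact ih A' w j (by omega) hb' hj hr'
    · exact ReachVia.done hex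

/-- **The composition of segment .9 from its six parts**: .9a → .9b → loop 3737 (`S9.loop_all` over .9c) → .9d → .9e or .9f by the
case "the request fits"; every error exit is the epilogue's assertion `AtERR`. Pure logic (`ReachVia.trans`). -/
theorem Seg9.of_parts {Lay : Layout} {μ : Microarch} {u₀ : State}
    (ha : Seg9a Lay μ u₀) (hb : Seg9b Lay μ u₀) (hc : Seg9c Lay μ u₀) (hd : Seg9d Lay μ u₀) (he : Seg9e Lay μ u₀)
    (hf : Seg9f Lay μ u₀) : Seg9 Lay μ u₀ := by
  intro g v hat
  -- 0x114184 … 0x114199: start_packet, crc32_init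
  refine (ha g v hat).trans ?_
  intro w1 h1
  rcases h1 with ⟨A1, hb1⟩ | herr
  rotate_left
  · exact ReachVia.done (Or.inr herr)
  -- 0x114199 … 0x1141f7: the packet type
  refine (hb g A1 w1 hb1).trans ?_
  intro w2 h2
  rcases h2 with ⟨A2, hb2, hr2⟩ | herr
  rotate_left
  · exact ReachVia.done (Or.inr herr)
  -- loop 3737 and vorbis_validate
  have hr2' : w2.reg .r13 = UInt64.ofNat 0 := hr2
  refine (S9.loop_all hc g 6 A2 w2 0 (by omega) hb2 (by omega) hr2').trans ?_
  intro w3 h3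
  obtain ⟨A3, hb3⟩ := h3
  -- 0x11420a … 0x11421f: the test of vorbis_validate, get_bits(f, 8)
  refine (hd g A3 w3 hb3).trans ?_
  intro w4 h4
  rcases h4 with ⟨A4, hb4, hlt4⟩ | herr
  rotate_left
  · exact ReachVia.done (Or.inr herr)
  -- 0x11421f … 0x11428b: codebook_count, the codebooks block, the memset
  by_cases hfit : A4.1.Fits (2120 * ((w4.reg .rax).toNat + 1))
  · exact hf g A4 w4 hb4 hlt4 hfit
  · exact he g A4 w4 hb4 hlt4 hfit

end Vorbis.Spec.StartDecoder
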